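-- pv_equiv track=rewrite | github.com/muawiya98/Task-Allocation | Codes/OptimazationUnit/TaskAllocation.py | index_of_tuple_with_greatest_min
-- ===== SOURCE A (Python) =====
-- def index_of_tuple_with_greatest_min(tuples):
--     max_count = -1
--     index = -1
--     for i, t in enumerate(tuples):
--         min_val = min(t)
--         count = t.count(min_val)
--         if count > max_count:
--             max_count = count
--             index = i
--         elif count == max_count:
--             if sum(t) < sum(tuples[index]):
--                 index = i
--     return index
-- ===== SOURCE B (Python) =====
-- def index_of_tuple_with_greatest_min(tuples):
--     if not tuples:
--         return -1
--     counts = [t.count(min(t)) for t in tuples]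
--     max_count = max(counts)
--     candidates = [i for i, c in enumerate(counts) if c == max_count]
--     best = candidates[0]
--     for i in candidates[1:]:
--         if sum(tuples[i]) < sum(tuples[best]):
--             best = i
--     return best
-- ===== Notes on version B (the rewrite author's own statement) =====
-- stated objective: alternative
-- what changed: A keeps a running (best-count, best-index) pair in one loop with an in-loop lookup of the current best's sum; B is a staged pipeline: compute all min-counts, take the global maximum, filter the candidate indices, then select the candidate with the smallest sum (earliest on ties).
import Mathlib
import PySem

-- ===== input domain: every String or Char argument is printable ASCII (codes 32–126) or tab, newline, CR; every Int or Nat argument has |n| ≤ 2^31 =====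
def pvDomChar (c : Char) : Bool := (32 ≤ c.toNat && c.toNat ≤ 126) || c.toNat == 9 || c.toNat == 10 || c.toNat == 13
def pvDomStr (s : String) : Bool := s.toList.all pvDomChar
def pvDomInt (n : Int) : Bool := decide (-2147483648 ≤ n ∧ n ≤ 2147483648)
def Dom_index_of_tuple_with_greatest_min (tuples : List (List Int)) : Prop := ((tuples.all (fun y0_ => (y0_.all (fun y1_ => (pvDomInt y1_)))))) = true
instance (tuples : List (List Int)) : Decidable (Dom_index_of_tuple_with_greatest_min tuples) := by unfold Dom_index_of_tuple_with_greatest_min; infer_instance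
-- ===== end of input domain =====

-- B replaces A's single running-best loop by a staged pipeline (all min-counts, global max,
-- candidate filter, smallest-sum pick) — objective: alternative decomposition, same cost.

-- ===== PORT A =====
-- shared helper: 't.count(min(t))' (min([]) raises in Python; excluded by Pre_, getD 0 here)
def pvMinCount (t : List Int) : Int :=
  ((PySem.List.count t ((PySem.List.min? t (fun x => x)).getD 0) : Nat) : Int)

-- shared helper: 'sum(tuples[i])'
def pvSumAt (tuples : List (List Int)) (i : Int) : Int :=
  ((PySem.List.pyGet? tuples i).getD []).sum

def pvStepA (tuples : List (List Int)) (st : Int × Int) (p : Int × List Int) : Int × Int :=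
  let count := pvMinCount p.2
  if count > st.1 then (count, p.1)
  else if count = st.1 then
    (if p.2.sum < pvSumAt tuples st.2 then (st.1, p.1) else st)
  else st

def index_of_tuple_with_greatest_min (tuples : List (List Int)) : Int :=
  ((PySem.List.enumerate tuples 0).foldl (pvStepA tuples) (-1, -1)).2

-- ===== PORT B =====
-- 'for i in candidates[1:]: if sum(tuples[i]) < sum(tuples[best]): best = i'
def pvBestOf (tuples : List (List Int)) (b0 : Int) (rest : List Int) : Int :=
  rest.foldl (fun best i => if pvSumAt tuples i < pvSumAt tuples best then i else best) b0

def index_of_tuple_with_greatest_min_alt (tuples : List (List Int)) : Int :=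
  if tuples = [] then -1
  else
    let counts := tuples.map pvMinCount
    let max_count := (PySem.List.max? counts (fun x => x)).getD 0
    let candidates := (PySem.List.enumerate counts 0).filterMap
      (fun p => if p.2 = max_count then some p.1 else none)
    match candidates with
    | [] => -1   -- unreachable: the maximum of a nonempty list is attained
    | b0 :: rest => pvBestOf tuples b0 rest

-- ===== PRECONDITION & SPEC =====
-- Pre_ excludes exactly the inputs on which Python A raises: min(t) is a ValueError on an empty inner list.
def Pre_index_of_tuple_with_greatest_min (tuples : List (List Int)) : Prop :=
  ∀ t ∈ tuples, t ≠ []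
instance (tuples : List (List Int)) : Decidable (Pre_index_of_tuple_with_greatest_min tuples) := by
  unfold Pre_index_of_tuple_with_greatest_min; infer_instance

def pvWitness_index_of_tuple_with_greatest_min : List (List Int) := [[1, 2], [2, 2], [0, 0, 5]]

def Spec_index_of_tuple_with_greatest_min (tuples : List (List Int)) (out : Int) : Prop := out = index_of_tuple_with_greatest_min_alt tuples
instance (tuples : List (List Int)) (out : Int) : Decidable (Spec_index_of_tuple_with_greatest_min tuples out) := by unfold Spec_index_of_tuple_with_greatest_min; infer_instance

-- ===== CLAIM (what is proved, stated in full; the proofs are below) =====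
def Claim_equal_index_of_tuple_with_greatest_min : Prop := ∀ (tuples : List (List Int)), Dom_index_of_tuple_with_greatest_min tuples → Pre_index_of_tuple_with_greatest_min tuples → Spec_index_of_tuple_with_greatest_min tuples (index_of_tuple_with_greatest_min tuples)

-- ===== LEMMAS AND PROOFS =====

-- reference recursion: state (max_count, index, sum-at-index), no global lookups
def pvRef : List (List Int) → Int → Int × Int × Int → Int × Int × Int
  | [], _, st => st
  | t :: ts, idx, (m, j, s) =>
    let k := pvMinCount t
    if k > m then pvRef ts (idx + 1) (k, idx, t.sum)
    else if k = m then
      (if t.sum < s then pvRef ts (idx + 1) (m, idx, t.sum) else pvRef ts (idx + 1) (m, j, s))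
    else pvRef ts (idx + 1) (m, j, s)

lemma pvMinCount_nonneg (t : List Int) : 0 ≤ pvMinCount t := Int.natCast_nonneg _

lemma pvRef_append (bs : List (List Int)) : ∀ (as_ : List (List Int)) (idx : Int) (st : Int × Int × Int),
    pvRef (as_ ++ bs) idx st = pvRef bs (idx + as_.length) (pvRef as_ idx st) := by
  intro as_
  induction as_ with
  | nil => intro idx st; simp [pvRef]
  | cons t ts ih =>
    intro idx st
    obtain ⟨m, j, s⟩ := st
    simp only [List.cons_append, pvRef]
    split_ifs with h1 h2 h3 <;>
      · rw [ih]; congr 1; simp; ring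

lemma A_eq_ref : ∀ (rest pre : List (List Int)) (m j s : Int),
    ((m = -1 ∧ j = -1) ∨ (∃ jn : Nat, j = (jn : Int) ∧ jn < pre.length ∧ pvSumAt (pre ++ rest) j = s)) →
    (PySem.List.enumerate rest (pre.length : Int)).foldl (pvStepA (pre ++ rest)) (m, j)
      = ((pvRef rest (pre.length : Int) (m, j, s)).1, (pvRef rest (pre.length : Int) (m, j, s)).2.1) := by
  intro rest
  induction rest with
  | nil => intro pre m j s _; simp [PySem.List.enumerate_nil, pvRef]
  | cons t ts ih =>
    intro pre m j s hyp
    have hlen : ((pre ++ [t]).length : Int) = (pre.length : Int) + 1 := by simp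
    have hlist : (pre ++ [t]) ++ ts = pre ++ t :: ts := by simp
    have hlook : pvSumAt (pre ++ t :: ts) (pre.length : Int) = t.sum := by
      simp [pvSumAt]
    have hk := pvMinCount_nonneg t
    rw [PySem.List.enumerate_cons, List.foldl_cons]
    rcases lt_trichotomy m (pvMinCount t) with h1 | h2 | h3
    · have hstep : pvStepA (pre ++ t :: ts) (m, j) ((pre.length : Int), t)
          = (pvMinCount t, (pre.length : Int)) := by
        simp only [pvStepA]; rw [if_pos h1]
      have href : pvRef (t :: ts) (pre.length : Int) (m, j, s)
          = pvRef ts ((pre.length : Int) + 1) (pvMinCount t, (pre.length : Int), t.sum) := by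
        simp only [pvRef]; rw [if_pos h1]
      rw [hstep, href]
      have := ih (pre ++ [t]) (pvMinCount t) (pre.length : Int) t.sum
        (Or.inr ⟨pre.length, rfl, by simp, by rw [hlist]; exact hlook⟩)
      rw [hlen, hlist] at this
      exact this
    · rcases hyp with ⟨hm, _⟩ | ⟨jn, hj, hjn, hs⟩
      · omega
      have hstep : pvStepA (pre ++ t :: ts) (m, j) ((pre.length : Int), t)
          = (if t.sum < s then (m, (pre.length : Int)) else (m, j)) := by
        simp only [pvStepA]; rw [if_neg (by omega), if_pos h2.symm, hs]
      have href : pvRef (t :: ts) (pre.length : Int) (m, j, s)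
          = (if t.sum < s then pvRef ts ((pre.length : Int) + 1) (m, (pre.length : Int), t.sum)
             else pvRef ts ((pre.length : Int) + 1) (m, j, s)) := by
        simp only [pvRef]; rw [if_neg (by omega), if_pos h2.symm]
      rw [hstep, href]
      by_cases hc : t.sum < s
      · rw [if_pos hc, if_pos hc]
        have := ih (pre ++ [t]) m (pre.length : Int) t.sum
          (Or.inr ⟨pre.length, rfl, by simp, by rw [hlist]; exact hlook⟩)
        rw [hlen, hlist] at this
        exact this
      · rw [if_neg hc, if_neg hc]
        have := ih (pre ++ [t]) m j s
          (Or.inr ⟨jn, hj, by simp; omega, by rw [hlist]; exact hs⟩)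
        rw [hlen, hlist] at this
        exact this
    · rcases hyp with ⟨hm, _⟩ | ⟨jn, hj, hjn, hs⟩
      · omega
      have hstep : pvStepA (pre ++ t :: ts) (m, j) ((pre.length : Int), t) = (m, j) := by
        simp only [pvStepA]; rw [if_neg (by omega), if_neg (by omega)]
      have href : pvRef (t :: ts) (pre.length : Int) (m, j, s)
          = pvRef ts ((pre.length : Int) + 1) (m, j, s) := by
        simp only [pvRef]; rw [if_neg (by omega), if_neg (by omega)]
      rw [hstep, href]
      have := ih (pre ++ [t]) m j s
        (Or.inr ⟨jn, hj, by simp; omega, by rw [hlist]; exact hs⟩)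
      rw [hlen, hlist] at this
      exact this

def pvMx (xs : List (List Int)) : Int := (PySem.List.max? (xs.map pvMinCount) (fun x => x)).getD 0

def pvCand (xs : List (List Int)) : List Int :=
  (PySem.List.enumerate (xs.map pvMinCount) 0).filterMap (fun p => if p.2 = pvMx xs then some p.1 else none)

lemma pvBestOf_ext (t1 t2 : List (List Int)) : ∀ (rest : List Int) (b0 : Int),
    pvSumAt t1 b0 = pvSumAt t2 b0 → (∀ i ∈ rest, pvSumAt t1 i = pvSumAt t2 i) →
    pvBestOf t1 b0 rest = pvBestOf t2 b0 rest := by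
  intro rest
  induction rest with
  | nil => intro b0 _ _; rfl
  | cons i is ih =>
    intro b0 hb hrest
    have hi := hrest i (by simp)
    simp only [pvBestOf, List.foldl_cons, hi, hb]
    by_cases hc : pvSumAt t2 i < pvSumAt t2 b0
    · simp only [if_pos hc]
      exact ih i hi (fun x hx => hrest x (by simp [hx]))
    · simp only [if_neg hc]
      exact ih b0 hb (fun x hx => hrest x (by simp [hx]))

-- candidate list as a function of the threshold (proof device)
def pvCandM (xs : List (List Int)) (M : Int) : List Int :=
  (PySem.List.enumerate (xs.map pvMinCount) 0).filterMap (fun p => if p.2 = M then some p.1 else none)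

lemma pvCand_eq (xs : List (List Int)) : pvCand xs = pvCandM xs (pvMx xs) := rfl

lemma pvRef_singleton (t : List Int) (idx m j s : Int) :
    pvRef [t] idx (m, j, s)
      = if pvMinCount t > m then (pvMinCount t, idx, t.sum)
        else if pvMinCount t = m then (if t.sum < s then (m, idx, t.sum) else (m, j, s))
        else (m, j, s) := by
  simp only [pvRef]

lemma pvSumAt_snoc_lt (xs : List (List Int)) (t : List Int) (kn : Nat) (h : kn < xs.length) :
    pvSumAt (xs ++ [t]) (kn : Int) = pvSumAt xs (kn : Int) := by
  simp [pvSumAt, PySem.List.pyGet?_natCast, List.getElem?_append_left h]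

lemma pvSumAt_snoc_self (xs : List (List Int)) (t : List Int) :
    pvSumAt (xs ++ [t]) ((xs.length : Nat) : Int) = t.sum := by
  simp [pvSumAt]

lemma pvCand_mem (xs : List (List Int)) (c : Int) (h : c ∈ pvCand xs) :
    ∃ kn : Nat, c = (kn : Int) ∧ kn < xs.length := by
  simp only [pvCand, List.mem_filterMap] at h
  obtain ⟨p, hp, hf⟩ := h
  rw [PySem.List.mem_enumerate_iff] at hp
  obtain ⟨kk, hkk, rfl⟩ := hp
  split at hf
  · exact ⟨kk, by simpa using hf.symm, by simpa using hkk⟩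
  · exact absurd hf (by simp)

lemma pvMx_isMax (xs : List (List Int)) (hxs : xs ≠ []) (c : Int) (hc : c ∈ xs.map pvMinCount) :
    c ≤ pvMx xs := by
  have hne : xs.map pvMinCount ≠ [] := by simpa using hxs
  cases hmax : PySem.List.max? (xs.map pvMinCount) (fun x => x) with
  | none => exact absurd ((PySem.List.max?_eq_none_iff _ _).mp hmax) hne
  | some M =>
    have := PySem.List.max?_isMax hmax c hc
    simpa [pvMx, hmax] using this

lemma pvMx_snoc (xs : List (List Int)) (t : List Int) (hxs : xs ≠ []) :
    pvMx (xs ++ [t]) = max (pvMx xs) (pvMinCount t) := by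
  have hne : xs.map pvMinCount ≠ [] := by simpa using hxs
  obtain ⟨c0, cr, hc⟩ := List.exists_cons_of_ne_nil hne
  simp [pvMx, List.map_append, hc, List.cons_append, PySem.List.max?_id_cons, List.foldl_append]

lemma pvCandM_snoc (xs : List (List Int)) (t : List Int) (M : Int) :
    pvCandM (xs ++ [t]) M
      = pvCandM xs M ++ (if pvMinCount t = M then [((xs.length : Nat) : Int)] else []) := by
  simp only [pvCandM, List.map_append, List.map_cons, List.map_nil,
    PySem.List.enumerate_append, PySem.List.enumerate_cons, PySem.List.enumerate_nil,
    List.filterMap_append, List.length_map]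
  congr 1
  split <;> simp [*]

lemma pvCandM_nil (xs : List (List Int)) (M : Int) (h : ∀ c ∈ xs.map pvMinCount, c ≠ M) :
    pvCandM xs M = [] := by
  rw [pvCandM, List.filterMap_eq_nil_iff]
  intro p hp
  rw [PySem.List.mem_enumerate_iff] at hp
  obtain ⟨kk, hkk, rfl⟩ := hp
  have hmem : (xs.map pvMinCount)[kk] ∈ xs.map pvMinCount := List.getElem_mem hkk
  exact if_neg (h _ hmem)

lemma Q_all : ∀ (xs : List (List Int)), xs ≠ [] →
    ∃ (bn : Nat) (b0 : Int) (rest : List Int),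
      bn < xs.length ∧
      pvRef xs 0 (-1, -1, 0) = (pvMx xs, (bn : Int), pvSumAt xs (bn : Int)) ∧
      pvCand xs = b0 :: rest ∧
      pvBestOf xs b0 rest = (bn : Int) := by
  intro xs
  induction xs using List.reverseRecOn with
  | nil => intro h; exact absurd rfl h
  | append_singleton xs t ih =>
    intro _
    have hk := pvMinCount_nonneg t
    by_cases hxs : xs = []
    · subst hxs
      refine ⟨0, 0, [], by simp, ?_, ?_, rfl⟩
      · rw [List.nil_append, pvRef_singleton, if_pos (by omega)]
        have h1 : pvMx [t] = pvMinCount t := by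
          simp [pvMx, PySem.List.max?_id_cons]
        have h2 : pvSumAt [t] 0 = t.sum := by simp [pvSumAt]
        simp [h1, h2]
      · simp [pvCand, pvMx, PySem.List.enumerate_cons, PySem.List.max?_id_cons]
    · obtain ⟨bn, b0, rest, hbn, href, hcand, hbest⟩ := ih hxs
      have hb0mem : b0 ∈ pvCand xs := by rw [hcand]; simp
      obtain ⟨b0n, hb0n, hb0lt⟩ := pvCand_mem xs b0 hb0mem
      have hb0ext : pvSumAt (xs ++ [t]) b0 = pvSumAt xs b0 := by
        rw [hb0n]; exact pvSumAt_snoc_lt xs t b0n hb0lt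
      have hrestext : ∀ i ∈ rest, pvSumAt (xs ++ [t]) i = pvSumAt xs i := by
        intro i hi
        obtain ⟨kn, hkn, hklt⟩ := pvCand_mem xs i (by rw [hcand]; simp [hi])
        rw [hkn]; exact pvSumAt_snoc_lt xs t kn hklt
      have hbext : pvBestOf (xs ++ [t]) b0 rest = (bn : Int) := by
        rw [pvBestOf_ext (xs ++ [t]) xs rest b0 hb0ext hrestext]; exact hbest
      have hrefsnoc : pvRef (xs ++ [t]) 0 (-1, -1, 0)
          = pvRef [t] ((xs.length : Nat) : Int) (pvMx xs, (bn : Int), pvSumAt xs (bn : Int)) := by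
        rw [pvRef_append [t] xs 0 (-1, -1, 0), href]; norm_num
      rcases lt_trichotomy (pvMinCount t) (pvMx xs) with hlt | heq | hgt
      · -- new key below the max: nothing changes
        have hmx2 : pvMx (xs ++ [t]) = pvMx xs := by
          rw [pvMx_snoc xs t hxs]; exact max_eq_left (le_of_lt hlt)
        have hcands : pvCand (xs ++ [t]) = pvCand xs := by
          rw [pvCand_eq, hmx2, pvCandM_snoc, if_neg (by omega), List.append_nil, pvCand_eq]
        refine ⟨bn, b0, rest, by simp; omega, ?_, by rw [hcands, hcand], hbext⟩
        rw [hrefsnoc, pvRef_singleton, if_neg (by omega), if_neg (by omega), hmx2,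
          pvSumAt_snoc_lt xs t bn hbn]
      · -- new key ties the max: one extra candidate at the end
        have hmx2 : pvMx (xs ++ [t]) = pvMx xs := by
          rw [pvMx_snoc xs t hxs]; exact max_eq_left (le_of_eq heq)
        have hcands : pvCand (xs ++ [t]) = b0 :: (rest ++ [((xs.length : Nat) : Int)]) := by
          rw [pvCand_eq, hmx2, pvCandM_snoc, if_pos heq, ← pvCand_eq, hcand]; rfl
        have hbsnoc : pvBestOf (xs ++ [t]) b0 (rest ++ [((xs.length : Nat) : Int)])
            = if t.sum < pvSumAt xs (bn : Int) then ((xs.length : Nat) : Int) else (bn : Int) := by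
          unfold pvBestOf
          rw [List.foldl_append]
          simp only [List.foldl_cons, List.foldl_nil]
          rw [show List.foldl
              (fun best i => if pvSumAt (xs ++ [t]) i < pvSumAt (xs ++ [t]) best then i else best)
              b0 rest = (bn : Int) from hbext]
          rw [pvSumAt_snoc_self, pvSumAt_snoc_lt xs t bn hbn]
        by_cases hc : t.sum < pvSumAt xs (bn : Int)
        · refine ⟨xs.length, b0, rest ++ [((xs.length : Nat) : Int)], by simp, ?_, hcands, ?_⟩
          · rw [hrefsnoc, pvRef_singleton, if_neg (by omega), if_pos heq, if_pos hc, hmx2,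
              pvSumAt_snoc_self]
          · rw [hbsnoc, if_pos hc]
        · refine ⟨bn, b0, rest ++ [((xs.length : Nat) : Int)], by simp; omega, ?_, hcands, ?_⟩
          · rw [hrefsnoc, pvRef_singleton, if_neg (by omega), if_pos heq, if_neg hc, hmx2,
              pvSumAt_snoc_lt xs t bn hbn]
          · rw [hbsnoc, if_neg hc]
      · -- new key beats the max: it is the only candidate
        have hmx2 : pvMx (xs ++ [t]) = pvMinCount t := by
          rw [pvMx_snoc xs t hxs]; exact max_eq_right (le_of_lt hgt)
        have hcands : pvCand (xs ++ [t]) = [((xs.length : Nat) : Int)] := by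
          rw [pvCand_eq, hmx2, pvCandM_snoc, if_pos rfl,
            pvCandM_nil xs (pvMinCount t) (fun c hc => by have := pvMx_isMax xs hxs c hc; omega),
            List.nil_append]
        refine ⟨xs.length, ((xs.length : Nat) : Int), [], by simp, ?_, hcands, rfl⟩
        rw [hrefsnoc, pvRef_singleton, if_pos (by omega), hmx2, pvSumAt_snoc_self]

-- ===== VERDICT (by name: the statement is the Claim_ definition above) =====
lemma alt_of_cand (tuples : List (List Int)) (hnil : tuples ≠ []) (b0 : Int) (rest : List Int)
    (hcand : pvCand tuples = b0 :: rest) :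
    index_of_tuple_with_greatest_min_alt tuples = pvBestOf tuples b0 rest := by
  simp only [index_of_tuple_with_greatest_min_alt, if_neg hnil]
  rw [show (PySem.List.enumerate (List.map pvMinCount tuples) 0).filterMap
      (fun p => if p.2 = (PySem.List.max? (List.map pvMinCount tuples) fun x => x).getD 0
                then some p.1 else none)
      = b0 :: rest from hcand]

theorem index_of_tuple_with_greatest_min_spec : Claim_equal_index_of_tuple_with_greatest_min := by
  intro tuples _ _
  unfold Spec_index_of_tuple_with_greatest_min
  by_cases hnil : tuples = []
  · subst hnil; decide
  · obtain ⟨bn, b0, rest, hbn, href, hcand, hbest⟩ := Q_all tuples hnil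
    have hA : index_of_tuple_with_greatest_min tuples = (bn : Int) := by
      unfold index_of_tuple_with_greatest_min
      have h := A_eq_ref tuples [] (-1) (-1) 0 (Or.inl ⟨rfl, rfl⟩)
      simp only [List.nil_append, List.length_nil, Nat.cast_zero] at h
      rw [h, href]
    rw [hA, alt_of_cand tuples hnil b0 rest hcand, hbest]
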